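-- pv_equiv track=rewrite | github.com/ThienNguyen27/lab-8 | tonghop.py | tonggiaithua
-- ===== SOURCE A (Python) =====
-- def tonggiaithua(n): #hàm tính tổng giai thừa
--     sum=0
--     def giaithua(n): #hàm tính giai thừa
--         giai_thua = 1;
--         if n==0 or n == 1:
--             return giai_thua;
--         else:
--             for i in range(2, n + 1):
--                 giai_thua = giai_thua * i;
--             return giai_thua;
--     for i in range(0,int(n)):
--         sum+=giaithua(i)
--     return sum
-- ===== SOURCE B (Python) =====
-- def tonggiaithua(n):
--     total = 0
--     fact = 1
--     for i in range(int(n)):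
--         total += fact
--         fact *= i + 1
--     return total
-- ===== Notes on version B (the rewrite author's own statement) =====
-- stated objective: faster
-- what changed: replaced the per-term factorial recomputation (inner helper loop) by a single pass that maintains a running factorial, so the inner loop disappears
import Mathlib
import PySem

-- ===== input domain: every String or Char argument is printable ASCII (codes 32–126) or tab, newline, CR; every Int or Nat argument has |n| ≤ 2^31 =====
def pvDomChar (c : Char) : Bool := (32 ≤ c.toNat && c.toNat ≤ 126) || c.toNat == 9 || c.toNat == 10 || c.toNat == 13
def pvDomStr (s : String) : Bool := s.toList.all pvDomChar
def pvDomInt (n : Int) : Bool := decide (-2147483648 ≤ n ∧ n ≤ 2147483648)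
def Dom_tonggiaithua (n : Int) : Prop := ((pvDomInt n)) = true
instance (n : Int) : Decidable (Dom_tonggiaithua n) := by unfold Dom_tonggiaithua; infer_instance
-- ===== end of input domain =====

-- B replaces A's per-term factorial recomputation by a single pass with a running factorial (O(n) instead of O(n^2)).


-- ===== PORT A =====
-- inner helper 'giaithua': factorial by a loop over range(2, n+1)
def giaithuaA (n : Int) : Int :=
  if n == 0 || n == 1 then 1
  else (PySem.List.pyRange 2 (n + 1) 1).foldl (fun g i => g * i) 1

def tonggiaithua (n : Int) : Int :=
  (PySem.List.pyRange 0 n 1).foldl (fun s i => s + giaithuaA i) 0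

-- ===== PORT B =====
def tonggiaithua_alt (n : Int) : Int :=
  ((PySem.List.pyRange 0 n 1).foldl
    (fun (p : Int × Int) i => (p.1 + p.2, p.2 * (i + 1))) (0, 1)).1

-- ===== PRECONDITION & SPEC =====
def Spec_tonggiaithua (n : Int) (out : Int) : Prop := out = tonggiaithua_alt n
instance (n : Int) (out : Int) : Decidable (Spec_tonggiaithua n out) := by unfold Spec_tonggiaithua; infer_instance

-- ===== CLAIM (what is proved, stated in full; the proofs are below) =====
def Claim_equal_tonggiaithua : Prop := ∀ (n : Int), Dom_tonggiaithua n → Spec_tonggiaithua n (tonggiaithua n)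

-- ===== LEMMAS AND PROOFS =====

-- A's branch for n = 0, 1 is the same value the loop form gives (empty range)
theorem giaithuaA_eq_fold (k : Int) :
    giaithuaA k = (PySem.List.pyRange 2 (k + 1) 1).foldl (fun g i => g * i) 1 := by
  unfold giaithuaA
  split
  · rename_i h
    rcases Bool.or_eq_true_iff.mp h with h | h <;>
      simp_all [PySem.List.pyRange_one_eq_nil]
  · rfl

theorem giaithuaA_succ (m : Nat) :
    giaithuaA ((m : Int) + 1) = giaithuaA (m : Int) * ((m : Int) + 1) := by
  match m with
  | 0 => decide
  | Nat.succ k =>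
    rw [giaithuaA_eq_fold, giaithuaA_eq_fold,
      PySem.List.pyRange_one_succ_right (a := 2) (b := ((k + 1 : Nat) : Int) + 1) (by push_cast; omega),
      List.foldl_append]
    simp

theorem fold_pair_invariant (m : Nat) :
    (PySem.List.pyRange 0 (m : Int) 1).foldl
        (fun (p : Int × Int) i => (p.1 + p.2, p.2 * (i + 1))) (0, 1)
      = ((PySem.List.pyRange 0 (m : Int) 1).foldl (fun s i => s + giaithuaA i) 0,
         giaithuaA (m : Int)) := by
  induction m with
  | zero => simp [PySem.List.pyRange_one_eq_nil, giaithuaA]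
  | succ m ih =>
    have h : ((m : Int) + 1) = ((m + 1 : Nat) : Int) := by push_cast; ring
    rw [← h, PySem.List.pyRange_one_succ_right (a := 0) (b := (m : Int)) (by omega),
      List.foldl_append, List.foldl_append, ih]
    simp [giaithuaA_succ]

-- ===== VERDICT (by name: the statement is the Claim_ definition above) =====
theorem tonggiaithua_spec : Claim_equal_tonggiaithua := by
  intro n _
  unfold Spec_tonggiaithua tonggiaithua tonggiaithua_alt
  by_cases h : n ≤ 0
  · simp [PySem.List.pyRange_one_eq_nil h]
  · have hn : n = (n.toNat : Int) := by omega
    rw [hn, fold_pair_invariant]
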